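-- pv_equiv track=rewrite | github.com/pypi-data/pypi-mirror-126 | packages/libdev/libdev-0.5-py3-none-any.whl/libdev/check.py | fake_login
-- ===== SOURCE A (Python) =====
-- def fake_login(value: str) -> bool:
--     """ Check a login / name / mail for a test format """
--
--     if value is None:
--         return False
--
--     value = value.lower()
--
--     return any(
--         fake in value
--         for fake in (
--             'test', 'тест', 'check',
--             'asd', 'qwe', 'rty', 'sdf', 'sfg', 'sfd', 'hgf', 'gfd',
--             'qaz', 'wsx', 'edc', 'rfv',
--             '111', '123',
--             'ыва', 'фыв', 'йцу', 'орп',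
--         )
--     )
-- ===== SOURCE B (Python) =====
-- _FAKES = (
--     'test', 'тест', 'check',
--     'asd', 'qwe', 'rty', 'sdf', 'sfg', 'sfd', 'hgf', 'gfd',
--     'qaz', 'wsx', 'edc', 'rfv',
--     '111', '123',
--     'ыва', 'фыв', 'йцу', 'орп',
-- )
--
--
-- def fake_login(value: str) -> bool:
--     """ Check a login / name / mail for a test format (single left-to-right scan) """
--
--     if value is None:
--         return False
--
--     value = value.lower()
--
--     i = 0
--     while i < len(value):
--         for p in _FAKES:
--             if value.startswith(p, i):
--                 return True
--         i += 1
--     return False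
-- ===== Notes on version B (the rewrite author's own statement) =====
-- stated objective: alternative
-- what changed: Instead of scanning the lowered string once per pattern with 21 separate substring-membership tests, B walks the string once and at each position tests each pattern with startswith, returning at the first hit.
import Mathlib
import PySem

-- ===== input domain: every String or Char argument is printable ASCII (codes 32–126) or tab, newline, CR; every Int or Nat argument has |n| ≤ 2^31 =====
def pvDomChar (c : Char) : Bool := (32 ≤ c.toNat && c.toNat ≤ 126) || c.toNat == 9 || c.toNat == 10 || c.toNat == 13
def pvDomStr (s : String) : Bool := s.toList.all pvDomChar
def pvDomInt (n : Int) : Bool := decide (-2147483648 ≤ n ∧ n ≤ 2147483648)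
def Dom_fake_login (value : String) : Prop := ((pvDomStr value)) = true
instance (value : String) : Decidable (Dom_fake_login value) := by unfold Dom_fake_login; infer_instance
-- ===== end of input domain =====

-- B replaces A's 21 independent substring scans by one left-to-right scan that tests
-- every pattern at each position (objective: alternative single-pass structure).

-- ===== PORT A =====
-- A: value.lower(), then any(fake in value for fake in (...)) — one `in` scan per pattern.
def fake_login (value : String) : Bool :=
  let v := PySem.Str.lower value
  ([ "test", "тест", "check",
     "asd", "qwe", "rty", "sdf", "sfg", "sfd", "hgf", "gfd",
     "qaz", "wsx", "edc", "rfv",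
     "111", "123",
     "ыва", "фыв", "йцу", "орп" ] : List String).any (fun fake => PySem.Str.isIn fake v)

-- ===== PORT B =====
-- B's pattern tuple _FAKES, as lists of characters (the scan works position by position).
def pvFakes : List (List Char) :=
  [ "test".toList, "тест".toList, "check".toList,
    "asd".toList, "qwe".toList, "rty".toList, "sdf".toList, "sfg".toList,
    "sfd".toList, "hgf".toList, "gfd".toList,
    "qaz".toList, "wsx".toList, "edc".toList, "rfv".toList,
    "111".toList, "123".toList,
    "ыва".toList, "фыв".toList, "йцу".toList, "орп".toList ]

-- B's while-loop: at position i (here: the suffix s) check value.startswith(p, i) for each p.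
def pvScan (s : List Char) : Bool :=
  match s with
  | [] => false
  | _ :: rest =>
      if pvFakes.any (fun p => PySem.Chars.startswith s p) then true
      else pvScan rest

def fake_login_alt (value : String) : Bool :=
  pvScan (PySem.Str.lower value).toList

-- ===== PRECONDITION & SPEC =====
def Spec_fake_login (value : String) (out : Bool) : Prop := out = fake_login_alt value
instance (value : String) (out : Bool) : Decidable (Spec_fake_login value out) := by unfold Spec_fake_login; infer_instance

-- ===== CLAIM (what is proved, stated in full; the proofs are below) =====
def Claim_equal_fake_login : Prop := ∀ (value : String), Dom_fake_login value → Spec_fake_login value (fake_login value)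

-- ===== LEMMAS AND PROOFS =====

-- The position scan finds a pattern iff some pattern is a substring.
theorem pvScan_eq_any_isIn (s : List Char) :
    pvScan s = pvFakes.any (fun p => PySem.Chars.isIn p s) := by
  induction s with
  | nil => decide
  | cons c rest ih =>
      rw [pvScan]
      by_cases h : (pvFakes.any (fun p => PySem.Chars.startswith (c :: rest) p)) = true
      · rw [if_pos h]
        obtain ⟨p, hp, hsw⟩ := List.any_eq_true.mp h
        exact (List.any_eq_true.mpr ⟨p, hp,
          (PySem.Chars.isIn_iff_infix p (c :: rest)).mpr
            ((PySem.Chars.startswith_iff (c :: rest) p).mp hsw).isInfix⟩).symm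
      · rw [if_neg h, ih]
        apply Bool.eq_iff_iff.mpr
        simp only [List.any_eq_true, PySem.Chars.isIn_iff_infix, List.infix_cons_iff]
        constructor
        · rintro ⟨p, hp, hinf⟩; exact ⟨p, hp, Or.inr hinf⟩
        · rintro ⟨p, hp, hpre | hinf⟩
          · exact absurd (List.any_eq_true.mpr
              ⟨p, hp, (PySem.Chars.startswith_iff (c :: rest) p).mpr hpre⟩) h
          · exact ⟨p, hp, hinf⟩

-- ===== VERDICT (by name: the statement is the Claim_ definition above) =====
theorem fake_login_spec : Claim_equal_fake_login := by
  intro value _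
  unfold Spec_fake_login fake_login fake_login_alt
  rw [pvScan_eq_any_isIn]
  simp [pvFakes, PySem.Str.isIn]
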